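/- GENERATED by mk_final_copies.py from the proof of the farm's unit `capture_pattern` (farm:capture_pattern.1: Lemmas.lean) as the
   re-elaboration sweep compiled it — do not edit. -/
import Vorbis.Spec.Units.capture_pattern

open X86 X86.User Asan Vorbis Vorbis.Spec

namespace Vorbis.Spec.capture_pattern

/-- What `capture_pattern` knows of the memory `m` after `k` of its `get8` calls have returned, relative to its entry memory `m0`:
`Bits` kept and μ not increased, `stream` moved forward by at most `k`. -/
structure After (Blk : Block → Prop) (len : Nat) (f : Nat) (m0 m : Mem) (k : Nat) : Prop where
  /-- `Bits f` kept, μ not increased -/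
  reader : ReaderPost Blk len m0 m f
  /-- `stream` only moves forward, by at most `k` bytes -/
  stream_le : stb_vorbis.stream m0 f ≤ stb_vorbis.stream m f ∧ stb_vorbis.stream m f ≤ stb_vorbis.stream m0 f + k

/-- What it knows when all `k` results were non-zero: `stream` advanced by exactly `k`, R of μ went down by `k`. -/
def Matched (f : Nat) (m0 m : Mem) (k : Nat) : Prop :=
  stb_vorbis.stream m f = stb_vorbis.stream m0 f + k ∧ mu m f + k * 65536 ≤ mu m0 f

/-- **A store off `*f`** (the return address of a call) keeps `Bits`, μ and `stream`. -/
theorem push_off_obj {Blk : Block → Prop} {len : Nat} {mem : Mem} {f : Nat} (h : Bits Blk len mem f) (w : Word) (k v : Nat)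
    (hw : w.toNat + k ≤ 2 ^ 64) (hoff : w.toNat + k ≤ f ∨ f + 1808 ≤ w.toNat) :
    Bits Blk len (mem.writeLE w k v) f ∧ mu (mem.writeLE w k v) f = mu mem f ∧
      stb_vorbis.stream (mem.writeLE w k v) f = stb_vorbis.stream mem f := by
  have hr := h.OBR
  simp only [voff] at hr
  have hs : Mem.EqOn f (f + 1808) mem (mem.writeLE w k v) := Mem.eqOn_writeLE mem w k v f 1808 hw (by omega)
  have hobj : (objBlock f).Same mem (mem.writeLE w k v) := hs
  refine ⟨?_, ?_, ?_⟩
  · exact h.frame_fields (Bits.SameFields.of_same hobj)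
  · exact mu_frame_obj (by omega) hobj
  · simp only [vacc, voff]
    exact hs.u64 _ (by omega) (by omega) (by omega)

/-- After `push rbx` (a store off `*f`) and no call: nothing of `*f` has changed. -/
theorem After.zero {Blk : Block → Prop} {len f : Nat} {m0 : Mem} (h : Bits Blk len m0 f) (w : Word) (v : Nat)
    (hw : w.toNat + 8 ≤ 2 ^ 64) (hoff : w.toNat + 8 ≤ f ∨ f + 1808 ≤ w.toNat) :
    After Blk len f m0 (m0.writeLE w 8 v) 0 ∧ Matched f m0 (m0.writeLE w 8 v) 0 := by
  obtain ⟨hb, hmu, hst⟩ := push_off_obj h w 8 v hw hoff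
  unfold Matched
  refine ⟨⟨⟨hb, ?_⟩, ?_, ?_⟩, ?_, ?_⟩
  all_goals omega

/-- The memory at the next `call get8` (the memory `m` after `k` calls, plus the return address pushed off `*f`) has `Bits`. -/
theorem After.bits_push {Blk : Block → Prop} {len f : Nat} {m0 m : Mem} {k : Nat} (h : After Blk len f m0 m k) (w : Word)
    (v : Nat) (hw : w.toNat + 8 ≤ 2 ^ 64) (hoff : w.toNat + 8 ≤ f ∨ f + 1808 ≤ w.toNat) :
    Bits Blk len (m.writeLE w 8 v) f :=
  (push_off_obj h.reader.bits w 8 v hw hoff).1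

/-- **One more `get8`**: entered at `s` (the memory after `k` calls plus the pushed return address), returned at `v`. -/
theorem After.step {Blk : Block → Prop} {len f : Nat} {m0 m : Mem} {k : Nat} (h : After Blk len f m0 m k) (w : Word)
    (x : Nat) (hw : w.toNat + 8 ≤ 2 ^ 64) (hoff : w.toNat + 8 ≤ f ∨ f + 1808 ≤ w.toNat) {s v : State}
    (hs : s.mem = m.writeLE w 8 x) (hp : Get8Post Blk len f s v) :
    After Blk len f m0 v.mem (k + 1) ∧ (Matched f m0 m k → v.reg .rax ≠ 0 → Matched f m0 v.mem (k + 1)) := by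
  obtain ⟨hb, hmu, hst⟩ := push_off_obj h.reader.bits w 8 x hw hoff
  rw [← hs] at hb hmu hst
  have hle := hp.stream_le
  have h1 := h.stream_le
  refine ⟨⟨⟨hp.reader.bits, ?_⟩, ?_, ?_⟩, ?_⟩
  · have := hp.reader.mu_le
    have := h.reader.mu_le
    omega
  · omega
  · omega
  · intro hm hne
    have ha := hp.adv hne
    unfold Matched at hm ⊢
    omega

/-- `cmp al, c ; je` taken with `c ≠ 0`: the result of `get8` is not zero. -/
theorem ne_zero_of_low_byte (x : Word) (c : Nat) (h : (Word.part Width.w8 x).toNat = c) (hc : c ≠ 0) : x ≠ 0 := by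
  intro h0
  apply hc
  rw [← h, h0]
  rfl

/-- **The postcondition at a `ret`**: after at most four calls, with eax = 0, or eax = 1 after four matches. -/
theorem After.post {Blk : Block → Prop} {len f : Nat} {u v : State} {k : Nat} (h : After Blk len f u.mem v.mem k) (hk : k ≤ 4)
    (hun : ShadowUntouched u.mem v.mem) (hr : v.reg .rax = 0 ∨ (v.reg .rax = 1 ∧ Matched f u.mem v.mem 4)) :
    CapturePost Blk len f u v := by
  have h1 := h.stream_le
  refine ⟨hun, h.reader, ?_, ⟨h1.1, by omega⟩, ?_⟩
  · rcases hr with h0 | h1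
    · exact Or.inl h0
    · exact Or.inr h1.1
  · intro hone
    rcases hr with h0 | h1
    · rw [h0] at hone
      exact absurd hone (by decide)
    · have hm := h1.2
      unfold Matched at hm
      omega

end Vorbis.Spec.capture_pattern
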